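-- pv_equiv track=rewrite | github.com/wenrongruan/CLIPBOARD- | core/query_parser.py | _consume_word
-- ===== SOURCE A (Python) =====
-- from typing import Any, List, Tuple
--
-- class QueryParseError(ValueError):
--     """查询字符串不符合语法时抛出。"""
--
-- def _consume_quoted(query: str, start: int) -> Tuple[int, str]:
--     """从 ``query[start] == '"'`` 开始读到下一个非转义 ``"``。"""
--     assert query[start] == '"'
--     i = start + 1
--     buf: List[str] = []
--     n = len(query)
--     while i < n:
--         ch = query[i]
--         if ch == "\\" and i + 1 < n and query[i + 1] == '"':
--             buf.append('"')
--             i += 2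
--             continue
--         if ch == '"':
--             return i + 1, "".join(buf)
--         buf.append(ch)
--         i += 1
--     raise QueryParseError("未闭合的引号短语（缺少结束 \"）")
--
-- def _consume_word(query: str, start: int) -> Tuple[int, str]:
--     """读一个"普通"token：直到下一个空白；遇到引号要把引号内当成 token 一部分。
--
--     例子::
--         tag:"my val"  → 当前规格不支持，这里也会把整段读进来但后续解析会失败。
--         -from:chrome  → 作为一个 word 读完。
--     """
--     i = start
--     n = len(query)
--     buf: List[str] = []
--     while i < n:
--         ch = query[i]
--         if ch.isspace():
--             break
--         if ch == '"':
--             # 把引号整体纳入当前 word，保留引号字符；例如 filter 值含引号会在稍后报错。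
--             end, inner = _consume_quoted(query, i)
--             buf.append('"')
--             buf.append(inner)
--             buf.append('"')
--             i = end
--             continue
--         buf.append(ch)
--         i += 1
--     return i, "".join(buf)
-- ===== SOURCE B (Python) =====
-- from typing import List, Tuple
--
-- class QueryParseError(ValueError):
--     """查询字符串不符合语法时抛出。"""
--
-- def _consume_word(query: str, start: int) -> Tuple[int, str]:
--     """Flat single-pass state machine: one loop with an in_quote flag
--     instead of delegating quoted segments to a helper."""
--     i = start
--     n = len(query)
--     in_quote = False
--     buf: List[str] = []
--     while i < n:
--         ch = query[i]
--         if in_quote: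
--             if ch == "\\" and i + 1 < n and query[i + 1] == '"':
--                 buf.append('"')
--                 i += 2
--             elif ch == '"':
--                 buf.append('"')
--                 in_quote = False
--                 i += 1
--             else:
--                 buf.append(ch)
--                 i += 1
--         else:
--             if ch.isspace():
--                 break
--             if ch == '"':
--                 buf.append('"')
--                 in_quote = True
--             else:
--                 buf.append(ch)
--             i += 1
--     if in_quote:
--         raise QueryParseError("未闭合的引号短语（缺少结束 \"）")
--     return i, "".join(buf)
-- ===== Notes on version B (the rewrite author's own statement) =====
-- stated objective: simpler
-- what changed: The helper _consume_quoted is eliminated: B is one flat single-pass state machine over the characters, carrying an in_quote boolean, with the unterminated-quote check moved to a single test after the loop.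
import Mathlib
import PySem

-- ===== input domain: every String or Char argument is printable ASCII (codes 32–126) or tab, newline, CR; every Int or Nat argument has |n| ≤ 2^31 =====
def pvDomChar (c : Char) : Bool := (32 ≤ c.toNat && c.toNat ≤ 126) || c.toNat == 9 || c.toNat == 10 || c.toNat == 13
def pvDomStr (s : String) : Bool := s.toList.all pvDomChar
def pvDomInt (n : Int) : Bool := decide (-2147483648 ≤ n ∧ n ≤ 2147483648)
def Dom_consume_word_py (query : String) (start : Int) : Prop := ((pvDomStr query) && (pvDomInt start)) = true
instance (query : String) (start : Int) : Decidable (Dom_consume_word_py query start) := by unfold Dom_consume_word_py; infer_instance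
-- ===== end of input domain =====

-- B replaces A's _consume_quoted helper call with one flat single-pass state machine
-- carrying an in_quote flag; equivalence is proved on all inputs where the Python A
-- returns (Pre_ excludes its raises).
-- Both ports walk the character stream Python's index loop visits (the suffix from
-- `start`; a negative in-range start wraps, so a suffix then the whole string), carrying
-- Python's index i alongside; this is exact on every input Pre_ admits.

-- ===== PORT A =====
-- _consume_quoted's loop: returns (end index, inner buf, remaining stream);
-- `none` = the QueryParseError raise path, which Pre_ excludes
def aQuoted : Int → List Char → List Char → Option (Int × List Char × List Char)
  | _, [], _ => none
  | i, ch :: r1, buf =>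
    if ch = '\\' then
      match r1 with
      | c2 :: r2 =>
        if c2 = '"' then aQuoted (i + 2) r2 (buf ++ ['"'])
        else aQuoted (i + 1) (c2 :: r2) (buf ++ [ch])
      | [] => aQuoted (i + 1) [] (buf ++ [ch])
    else if ch = '"' then some (i + 1, buf, r1)
    else aQuoted (i + 1) r1 (buf ++ [ch])

-- _consume_word's loop; the fuel only bounds the iteration count (it is called with
-- the stream length, which the loop can never exceed); `(0, [])` = excluded raise path
def aWord : Nat → Int → List Char → List Char → Int × List Char
  | 0, i, _, buf => (i, buf)
  | _ + 1, i, [], buf => (i, buf)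
  | f + 1, i, ch :: r1, buf =>
    if PySem.Chars.isspace ch then (i, buf)
    else if ch = '"' then
      match aQuoted (i + 1) r1 [] with
      | none => (0, [])
      | some (e, inner, r2) => aWord f e r2 (buf ++ ['"'] ++ inner ++ ['"'])
    else aWord f (i + 1) r1 (buf ++ [ch])

def consume_word_py (query : String) (start : Int) : Int × String :=
  let cs := query.toList
  let rest := if start < 0 then cs.drop ((cs.length : Int) + start).toNat ++ cs else cs.drop start.toNat
  let r := aWord rest.length start rest []
  (r.1, String.ofList r.2)

-- ===== PORT B =====
-- B's single flat loop with the in_quote flag; `(0, [])` = excluded raise path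
def bLoop : Int → Bool → List Char → List Char → Int × List Char
  | i, inQ, ch :: r1, buf =>
    if inQ then
      if ch = '\\' then
        match r1 with
        | [] => bLoop (i + 1) true [] (buf ++ [ch])
        | c2 :: r2 =>
          if c2 = '"' then bLoop (i + 2) true r2 (buf ++ ['"'])
          else bLoop (i + 1) true (c2 :: r2) (buf ++ [ch])
      else if ch = '"' then bLoop (i + 1) false r1 (buf ++ ['"'])
      else bLoop (i + 1) true r1 (buf ++ [ch])
    else
      if PySem.Chars.isspace ch then (i, buf)
      else if ch = '"' then bLoop (i + 1) true r1 (buf ++ ['"'])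
      else bLoop (i + 1) false r1 (buf ++ [ch])
  | i, inQ, [], buf => if inQ then (0, []) else (i, buf)

def consume_word_py_alt (query : String) (start : Int) : Int × String :=
  let cs := query.toList
  let rest := if start < 0 then cs.drop ((cs.length : Int) + start).toNat ++ cs else cs.drop start.toNat
  let r := bLoop start false rest []
  (r.1, String.ofList r.2)

-- ===== PRECONDITION & SPEC =====
-- scanning-state predicate, a single-char automaton: state 0 = outside a quote,
-- 1 = inside, 2 = inside just after a backslash; true iff every quote opened before
-- the word ends is closed again (the escape \" does not close)
def pvQuoteClosed : Nat → List Char → Bool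
  | st, [] => st == 0
  | 0, c :: rest =>
    if PySem.Chars.isspace c then true
    else if c = '"' then pvQuoteClosed 1 rest
    else pvQuoteClosed 0 rest
  | 1, c :: rest =>
    if c = '\\' then pvQuoteClosed 2 rest
    else if c = '"' then pvQuoteClosed 0 rest
    else pvQuoteClosed 1 rest
  | _, c :: rest =>
    if c = '"' then pvQuoteClosed 1 rest
    else if c = '\\' then pvQuoteClosed 2 rest
    else pvQuoteClosed 1 rest


-- Pre_ excludes exactly the inputs where the Python A raises: start < -len(query)
-- (IndexError) and an unterminated quote in the scanned word (QueryParseError).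
def Pre_consume_word_py (query : String) (start : Int) : Prop :=
  -(query.toList.length : Int) ≤ start ∧
  pvQuoteClosed 0
    (if start < 0 then query.toList.drop ((query.toList.length : Int) + start).toNat ++ query.toList
     else query.toList.drop start.toNat) = true
instance (query : String) (start : Int) : Decidable (Pre_consume_word_py query start) := by
  unfold Pre_consume_word_py; infer_instance

def pvWitness_consume_word_py : String × Int := ("a\"b c\"d e", 0)

def Spec_consume_word_py (query : String) (start : Int) (out : Int × String) : Prop := out = consume_word_py_alt query start
instance (query : String) (start : Int) (out : Int × String) : Decidable (Spec_consume_word_py query start out) := by unfold Spec_consume_word_py; infer_instance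

-- ===== CLAIM (what is proved, stated in full; the proofs are below) =====
def Claim_equal_consume_word_py : Prop := ∀ (query : String) (start : Int), Dom_consume_word_py query start → Pre_consume_word_py query start → Spec_consume_word_py query start (consume_word_py query start)

-- ===== LEMMAS AND PROOFS =====

-- the quoted-loop accumulator factors out
theorem aQuoted_acc (i : Int) (r a b : List Char) :
    aQuoted i r (a ++ b) = Option.map (fun p => (p.1, a ++ p.2.1, p.2.2)) (aQuoted i r b) := by
  fun_induction aQuoted i r b with
  | case1 i b => simp [aQuoted]
  | case2 i buf r2 ih => simp only [aQuoted]; simpa using ih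
  | case3 i buf c2 r2 h2 ih => rw [aQuoted.eq_def]; simpa [h2] using ih
  | case4 i buf ih => simp only [aQuoted]; simpa using ih
  | case5 i r1 buf h1 => rw [aQuoted.eq_def]; simp
  | case6 i ch r1 buf h1 h2 ih => rw [aQuoted.eq_def]; simpa [h1, h2] using ih

-- the quoted loop only consumes characters
theorem aQuoted_len (i : Int) (r buf : List Char) (p : Int × List Char × List Char)
    (h : aQuoted i r buf = some p) : p.2.2.length ≤ r.length := by
  fun_induction aQuoted i r buf with
  | case1 i b => simp [aQuoted] at h
  | case2 i buf r2 ih => exact le_trans (ih h) (by simp only [List.length_cons]; omega)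
  | case3 i buf c2 r2 h2 ih => exact le_trans (ih h) (by simp only [List.length_cons]; omega)
  | case4 i buf ih => exact le_trans (ih h) (by simp only [List.length_cons]; omega)
  | case5 i r1 buf h1 => simp [aQuoted] at h; subst h; simp
  | case6 i ch r1 buf h1 h2 ih => exact le_trans (ih h) (by simp only [List.length_cons]; omega)

-- B's loop in quote state runs A's quoted-loop and then resumes outside the quote
theorem bLoop_true (i : Int) (r acc : List Char) :
    bLoop i true r acc =
      match aQuoted i r acc with
      | none => ((0 : Int), ([] : List Char))
      | some p => bLoop p.1 false p.2.2 (p.2.1 ++ ['"']) := by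
  fun_induction aQuoted i r acc with
  | case1 i b => simp [bLoop, aQuoted]
  | case2 i buf r2 ih => rw [bLoop.eq_def]; simpa using ih
  | case3 i buf c2 r2 h2 ih => rw [bLoop.eq_def]; simpa [h2] using ih
  | case4 i buf ih => rw [bLoop.eq_def]; simpa using ih
  | case5 i r1 buf h1 => rw [bLoop.eq_def]; simp
  | case6 i ch r1 buf h1 h2 ih => rw [bLoop.eq_def]; simpa [h1, h2] using ih

-- main loop equivalence: A's outer loop (with sufficient fuel) equals B's loop in
-- non-quote state
theorem aWord_eq_bLoop (f : Nat) (r : List Char) (i : Int) (buf : List Char)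
    (h : r.length ≤ f) : aWord f i r buf = bLoop i false r buf := by
  induction f generalizing r i buf with
  | zero =>
    have : r = [] := by simpa using List.length_eq_zero_iff.mp (Nat.le_zero.mp h)
    subst this; rw [aWord, bLoop.eq_def]; simp
  | succ f ih =>
    match r with
    | [] => rw [aWord, bLoop.eq_def]; simp
    | ch :: r1 =>
      rw [aWord, bLoop.eq_def]
      by_cases hs : PySem.Chars.isspace ch = true
      · simp [hs]
      · simp only [hs, Bool.false_eq_true, if_false]
        by_cases hq : ch = '"'
        · subst hq
          rw [bLoop_true]
          have hacc : aQuoted (i + 1) r1 (buf ++ ['"']) =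
              Option.map (fun p => (p.1, (buf ++ ['"']) ++ p.2.1, p.2.2)) (aQuoted (i + 1) r1 []) := by
            simpa using aQuoted_acc (i + 1) r1 (buf ++ ['"']) []
          rw [hacc]
          cases hres : aQuoted (i + 1) r1 [] with
          | none => simp
          | some p =>
            simp only [Option.map_some]
            have hlen : p.2.2.length ≤ r1.length := aQuoted_len (i + 1) r1 [] p hres
            rw [ih p.2.2 p.1 (buf ++ ['"'] ++ p.2.1 ++ ['"']) (by simp at h; omega)]
            simp
        · simp only [hq, if_false]
          exact ih r1 (i + 1) (buf ++ [ch]) (by simpa using Nat.le_of_succ_le_succ (by simpa using h))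

-- ===== VERDICT (by name: the statement is the Claim_ definition above) =====
theorem consume_word_py_spec : Claim_equal_consume_word_py := by
  intro query start _ _
  unfold Spec_consume_word_py consume_word_py consume_word_py_alt
  simp only []
  rw [aWord_eq_bLoop _ _ _ _ (le_refl _)]
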